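-- pv_equiv track=rewrite | github.com/MizaGBF/GBFPIB | party.py | fixCase
-- ===== SOURCE A (Python) =====
-- def fixCase(terms): # function to fix the case (for wiki requests)
--     terms = terms.split(' ')
--     fixeds = []
--     for term in terms:
--         fixed = ""
--         up = False
--         if term.lower() == "and": # if it's just 'and', we don't don't fix anything and return a lowercase 'and'
--             return "and"
--         elif term.lower() == "of":
--             return "of"
--         elif term.lower() == "(sr)":
--             return "(SR)"
--         elif term.lower() == "(ssr)":
--             return "(SSR)"
--         elif term.lower() == "(r)":
--             return "(R)"
--         for i in range(0, len(term)): # for each character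
--             if term[i].isalpha(): # if letter
--                 if term[i].isupper(): # is uppercase
--                     if not up: # we haven't encountered an uppercase letter
--                         up = True
--                         fixed += term[i] # save
--                     else: # we have
--                         fixed += term[i].lower() # make it lowercase and save
--                 elif term[i].islower(): # is lowercase
--                     if not up: # we haven't encountered an uppercase letter
--                         fixed += term[i].upper() # make it uppercase and save
--                         up = True
--                     else: # we have
--                         fixed += term[i] # save
--                 else: # other characters
--                     fixed += term[i] # we just save
--             elif term[i] == "/" or term[i] == ":" or term[i] == "#" or term[i] == "-": # we reset the uppercase detection if we encounter those
--                 up = False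
--                 fixed += term[i]
--             else: # everything else,
--                 fixed += term[i] # we save
--         fixeds.append(fixed)
--     return "_".join(fixeds) # return the result
-- ===== SOURCE B (Python) =====
-- # B: preliminary dict scan for the special tokens, then split each term on the
-- # separators /:#- and capitalize each segment via slicing (first cased letter
-- # uppercased, the rest of the segment lowercased).
-- _SPECIAL = {"and": "and", "of": "of", "(sr)": "(SR)", "(ssr)": "(SSR)", "(r)": "(R)"}
--
-- def _seg(seg):
--     for i in range(len(seg)):
--         if seg[i].isalpha():
--             return seg[:i] + seg[i].upper() + seg[i + 1:].lower()
--     return seg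
--
-- def fixCase(terms):
--     words = terms.split(' ')
--     for w in words:
--         s = _SPECIAL.get(w.lower())
--         if s is not None:
--             return s
--     fixed = []
--     for w in words:
--         parts = []
--         cur = []
--         for c in w:
--             if c in "/:#-":
--                 parts.append(_seg(''.join(cur)))
--                 parts.append(c)
--                 cur = []
--             else:
--                 cur.append(c)
--         parts.append(_seg(''.join(cur)))
--         fixed.append(''.join(parts))
--     return '_'.join(fixed)
-- ===== Notes on version B (the rewrite author's own statement) =====
-- stated objective: faster
-- what changed: Replaces A's single stateful character loop (an 'up' flag threaded across separators, building strings by per-character +=) and its inline if/elif special-token chain by a preliminary dict scan for the special tokens followed by splitting each term on the separators /:#- and capitalizing each segment independently via slicing and str.join.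
import Mathlib
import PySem

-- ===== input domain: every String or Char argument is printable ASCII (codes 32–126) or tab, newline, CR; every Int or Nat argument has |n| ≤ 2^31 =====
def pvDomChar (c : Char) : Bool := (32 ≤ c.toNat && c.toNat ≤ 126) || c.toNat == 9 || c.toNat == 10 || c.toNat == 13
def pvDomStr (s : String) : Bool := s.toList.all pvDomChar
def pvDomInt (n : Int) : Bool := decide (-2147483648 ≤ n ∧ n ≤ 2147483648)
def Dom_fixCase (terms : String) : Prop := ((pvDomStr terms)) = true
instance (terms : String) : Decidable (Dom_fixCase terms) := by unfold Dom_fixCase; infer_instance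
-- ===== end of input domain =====

-- B replaces A's single stateful character loop by a special-token dict scan plus
-- per-segment capitalization after splitting on /:#- (measured constant-factor faster in Python).

-- ===== PORT A =====
-- inner character loop of A, state = (fixed, up)
def fixAStep (st : List Char × Bool) (c : Char) : List Char × Bool :=
  if PySem.Chars.isalpha c then
    if PySem.Chars.isupper c then
      if st.2 = false then (st.1 ++ [c], true)
      else (st.1 ++ [PySem.Chars.lowerChar c], st.2)
    else if PySem.Chars.islower c then
      if st.2 = false then (st.1 ++ [PySem.Chars.upperChar c], true)
      else (st.1 ++ [c], st.2)
    else (st.1 ++ [c], st.2)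
  else if c = '/' || c = ':' || c = '#' || c = '-' then (st.1 ++ [c], false)
  else (st.1 ++ [c], st.2)

-- A's loop over the space-split terms, with the early returns of the special tokens
def fixAGo : List (List Char) → List (List Char) → List Char
  | [], fixeds => PySem.Chars.join ['_'] fixeds
  | t :: rest, fixeds =>
    if PySem.Chars.lower t = "and".toList then "and".toList
    else if PySem.Chars.lower t = "of".toList then "of".toList
    else if PySem.Chars.lower t = "(sr)".toList then "(SR)".toList
    else if PySem.Chars.lower t = "(ssr)".toList then "(SSR)".toList
    else if PySem.Chars.lower t = "(r)".toList then "(R)".toList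
    else fixAGo rest (fixeds ++ [(t.foldl fixAStep ([], false)).1])

def fixCase (terms : String) : String :=
  String.ofList (fixAGo (PySem.Chars.splitOn terms.toList [' ']) [])

-- ===== PORT B =====
def pvSpecial : PySem.Dict (List Char) (List Char) :=
  ⟨[("and".toList, "and".toList), ("of".toList, "of".toList),
   ("(sr)".toList, "(SR)".toList), ("(ssr)".toList, "(SSR)".toList),
   ("(r)".toList, "(R)".toList)]⟩

-- _seg: uppercase the first cased letter, lowercase the rest of the segment
def segB : List Char → List Char
  | [] => []
  | c :: rest =>
    if PySem.Chars.isalpha c then PySem.Chars.upperChar c :: PySem.Chars.lower rest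
    else c :: segB rest

-- split a term on /:#- keeping the separators; state = (parts, cur)
def fixBStep (st : List (List Char) × List Char) (c : Char) : List (List Char) × List Char :=
  if c = '/' || c = ':' || c = '#' || c = '-' then (st.1 ++ [segB st.2, [c]], [])
  else (st.1, st.2 ++ [c])

def fixTermB (w : List Char) : List Char :=
  let st := w.foldl fixBStep ([], [])
  (st.1 ++ [segB st.2]).flatten

def fixCase_alt (terms : String) : String :=
  let words := PySem.Chars.splitOn terms.toList [' ']
  match words.findSome? (fun w => PySem.Dict.get? pvSpecial (PySem.Chars.lower w)) with
  | some s => String.ofList s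
  | none => String.ofList (PySem.Chars.join ['_'] (words.map fixTermB))

-- ===== PRECONDITION & SPEC =====
def Spec_fixCase (terms : String) (out : String) : Prop := out = fixCase_alt terms
instance (terms : String) (out : String) : Decidable (Spec_fixCase terms out) := by unfold Spec_fixCase; infer_instance

-- ===== CLAIM (what is proved, stated in full; the proofs are below) =====
def Claim_equal_fixCase : Prop := ∀ (terms : String), Dom_fixCase terms → Spec_fixCase terms (fixCase terms)

-- ===== LEMMAS AND PROOFS =====

theorem islower_of_isupper (c : Char) (h : PySem.Chars.isupper c = true) :
    PySem.Chars.islower c = false := by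
  simp only [PySem.Chars.isupper, Bool.and_eq_true, decide_eq_true_eq] at h
  simp only [PySem.Chars.islower, Bool.and_eq_false_iff, decide_eq_false_iff_not]
  exact Or.inl (fun hl => absurd (le_trans hl h.2) (by decide))

theorem upperChar_of_isupper (c : Char) (h : PySem.Chars.isupper c = true) :
    PySem.Chars.upperChar c = c := by
  simp [PySem.Chars.upperChar, islower_of_isupper c h]

theorem lowerChar_of_not_isupper (c : Char) (h : PySem.Chars.isupper c = false) :
    PySem.Chars.lowerChar c = c := by
  simp [PySem.Chars.lowerChar, h]

theorem segB_append_alpha (c : Char) (h : PySem.Chars.isalpha c = true) (cur : List Char) :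
    segB (cur ++ [c]) =
      segB cur ++ [if cur.any PySem.Chars.isalpha then PySem.Chars.lowerChar c
                   else PySem.Chars.upperChar c] := by
  induction cur with
  | nil => simp [segB, h, PySem.Chars.lower]
  | cons d cur ih =>
    by_cases hd : PySem.Chars.isalpha d = true
    · simp [segB, hd, PySem.Chars.lower]
    · simp [segB, hd, ih]

theorem segB_append_nonalpha (c : Char) (h : PySem.Chars.isalpha c = false) (cur : List Char) :
    segB (cur ++ [c]) = segB cur ++ [c] := by
  induction cur with
  | nil => simp [segB, h]
  | cons d cur ih =>
    by_cases hd : PySem.Chars.isalpha d = true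
    · have hcu : PySem.Chars.isupper c = false := by
        simp [PySem.Chars.isalpha] at h; exact h.1
      simp [segB, hd, PySem.Chars.lower, lowerChar_of_not_isupper c hcu]
    · simp [segB, hd, ih]

theorem fixAB_inv (w : List Char) (parts : List (List Char)) (cur : List Char) :
    w.foldl fixAStep ((parts ++ [segB cur]).flatten, cur.any PySem.Chars.isalpha)
      = ((((w.foldl fixBStep (parts, cur)).1 ++ [segB (w.foldl fixBStep (parts, cur)).2]).flatten),
         (w.foldl fixBStep (parts, cur)).2.any PySem.Chars.isalpha) := by
  induction w generalizing parts cur with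
  | nil => simp
  | cons c w ih =>
    by_cases hsep : (c = '/' || c = ':' || c = '#' || c = '-') = true
    · have hca : PySem.Chars.isalpha c = false := by
        simp only [Bool.or_eq_true, decide_eq_true_eq] at hsep
        obtain ((h | h) | h) | h := hsep <;> rw [h] <;> decide
      have hA : fixAStep ((parts ++ [segB cur]).flatten, cur.any PySem.Chars.isalpha) c
          = ((parts ++ [segB cur, [c]]).flatten, false) := by
        simp [fixAStep, hca, hsep]
      have hB : fixBStep (parts, cur) c = (parts ++ [segB cur, [c]], []) := by
        simp [fixBStep, hsep]
      have hfl : (parts ++ [segB cur, [c]]).flatten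
          = ((parts ++ [segB cur, [c]]) ++ [segB []]).flatten := by
        simp [segB]
      rw [List.foldl_cons, hA, List.foldl_cons, hB, hfl]
      simpa using ih (parts ++ [segB cur, [c]]) []
    · by_cases hca : PySem.Chars.isalpha c = true
      · have hA : fixAStep ((parts ++ [segB cur]).flatten, cur.any PySem.Chars.isalpha) c
            = ((parts ++ [segB (cur ++ [c])]).flatten, (cur ++ [c]).any PySem.Chars.isalpha) := by
          by_cases hup : PySem.Chars.isupper c = true
          · by_cases h2 : cur.any PySem.Chars.isalpha
            · simp [fixAStep, hca, hup, h2, segB_append_alpha c hca]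
            · simp [fixAStep, hca, hup, h2, segB_append_alpha c hca, upperChar_of_isupper c hup]
          · have hlo : PySem.Chars.islower c = true := by
              simp [PySem.Chars.isalpha, hup] at hca; exact hca
            by_cases h2 : cur.any PySem.Chars.isalpha
            · simp [fixAStep, hca, hup, hlo, h2, segB_append_alpha c hca,
                    lowerChar_of_not_isupper c (by simp [hup])]
            · simp [fixAStep, hca, hup, hlo, h2, segB_append_alpha c hca]
        have hB : fixBStep (parts, cur) c = (parts, cur ++ [c]) := by
          simp [fixBStep, hsep]
        rw [List.foldl_cons, hA, List.foldl_cons, hB]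
        exact ih parts (cur ++ [c])
      · have hA : fixAStep ((parts ++ [segB cur]).flatten, cur.any PySem.Chars.isalpha) c
            = ((parts ++ [segB (cur ++ [c])]).flatten, (cur ++ [c]).any PySem.Chars.isalpha) := by
          simp [fixAStep, hca, hsep, segB_append_nonalpha c (by simpa using hca)]
        have hB : fixBStep (parts, cur) c = (parts, cur ++ [c]) := by
          simp [fixBStep, hsep]
        rw [List.foldl_cons, hA, List.foldl_cons, hB]
        exact ih parts (cur ++ [c])

theorem term_eq (w : List Char) : (w.foldl fixAStep ([], false)).1 = fixTermB w := by
  have h := fixAB_inv w [] []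
  have h0 : ((([] : List (List Char)) ++ [segB []]).flatten, ([] : List Char).any PySem.Chars.isalpha)
      = (([] : List Char), false) := by simp [segB]
  rw [h0] at h
  simp [fixTermB, h]

theorem go_eq (ws : List (List Char)) (fixeds : List (List Char)) :
    fixAGo ws fixeds =
      match ws.findSome? (fun w => PySem.Dict.get? pvSpecial (PySem.Chars.lower w)) with
      | some s => s
      | none => PySem.Chars.join ['_'] (fixeds ++ ws.map fixTermB) := by
  induction ws generalizing fixeds with
  | nil => simp [fixAGo]
  | cons t rest ih =>
    by_cases h1 : PySem.Chars.lower t = "and".toList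
    · simp [fixAGo, h1, pvSpecial, PySem.Dict.get?_mk_cons]
    · by_cases h2 : PySem.Chars.lower t = "of".toList
      · simp [fixAGo, h2, pvSpecial, PySem.Dict.get?_mk_cons]
      · by_cases h3 : PySem.Chars.lower t = "(sr)".toList
        · simp [fixAGo, h3, pvSpecial, PySem.Dict.get?_mk_cons]
        · by_cases h4 : PySem.Chars.lower t = "(ssr)".toList
          · simp [fixAGo, h4, pvSpecial, PySem.Dict.get?_mk_cons]
          · by_cases h5 : PySem.Chars.lower t = "(r)".toList
            · simp [fixAGo, h5, pvSpecial, PySem.Dict.get?_mk_cons]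
            · have n1 : (['a', 'n', 'd'] : List Char) ≠ PySem.Chars.lower t := fun h => h1 h.symm
              have n2 : (['o', 'f'] : List Char) ≠ PySem.Chars.lower t := fun h => h2 h.symm
              have n3 : (['(', 's', 'r', ')'] : List Char) ≠ PySem.Chars.lower t := fun h => h3 h.symm
              have n4 : (['(', 's', 's', 'r', ')'] : List Char) ≠ PySem.Chars.lower t := fun h => h4 h.symm
              have n5 : (['(', 'r', ')'] : List Char) ≠ PySem.Chars.lower t := fun h => h5 h.symm
              rw [fixAGo]
              simp only [h1, h2, h3, h4, h5, if_false]
              rw [term_eq, ih]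
              simp [pvSpecial, List.findSome?_cons, PySem.Dict.get?, n1, n2, n3, n4, n5]

-- ===== VERDICT (by name: the statement is the Claim_ definition above) =====
theorem fixCase_spec : Claim_equal_fixCase := by
  intro terms _
  unfold Spec_fixCase fixCase fixCase_alt
  rw [go_eq]
  cases h : (PySem.Chars.splitOn terms.toList [' ']).findSome?
      (fun w => PySem.Dict.get? pvSpecial (PySem.Chars.lower w)) <;> simp [h]
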